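-- pv_equiv track=rewrite | github.com/EkowO/ekows-famvyux | app/utils_new.py | organize_movies_by_genre
-- ===== SOURCE A (Python) =====
-- def organize_movies_by_genre(movies):
--     """Organize a list of movies by genre, limiting to 10 per genre"""
--     genre_movies = {}
--
--     for movie in movies:
--         genres = movie.get('Genre', '').split(', ')
--
--         for genre in genres:
--             if genre and genre != 'N/A':
--                 if genre not in genre_movies:
--                     genre_movies[genre] = []
--
--                 # Add movie to genre if not already present and under limit
--                 if movie not in genre_movies[genre] and len(genre_movies[genre]) < 10:
--                     genre_movies[genre].append(movie)
--
--     return genre_movies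
-- ===== SOURCE B (Python) =====
-- def organize_movies_by_genre(movies):
--     """Organize a list of movies by genre, limiting to 10 per genre"""
--     # Pass 1: full grouping — every valid genre occurrence is recorded, no dedupe/cap.
--     grouped = {}
--     for movie in movies:
--         for genre in movie.get('Genre', '').split(', '):
--             if genre and genre != 'N/A':
--                 grouped.setdefault(genre, []).append(movie)
--     # Pass 2: order-preserving dedupe, then keep the first 10 distinct movies.
--     return {genre: _first_distinct(occ)[:10] for genre, occ in grouped.items()}
--
--
-- def _first_distinct(occ):
--     seen = []
--     for m in occ:
--         if m not in seen:
--             seen.append(m)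
--     return seen
-- ===== Notes on version B (the rewrite author's own statement) =====
-- stated objective: alternative
-- what changed: A interleaves key creation, duplicate checking and the 10-per-genre cap inside one insert loop; B first groups every valid genre occurrence without any dedupe or cap, then post-processes each genre's occurrence list with an order-preserving dedupe truncated to the first 10 distinct movies.
import Mathlib
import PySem

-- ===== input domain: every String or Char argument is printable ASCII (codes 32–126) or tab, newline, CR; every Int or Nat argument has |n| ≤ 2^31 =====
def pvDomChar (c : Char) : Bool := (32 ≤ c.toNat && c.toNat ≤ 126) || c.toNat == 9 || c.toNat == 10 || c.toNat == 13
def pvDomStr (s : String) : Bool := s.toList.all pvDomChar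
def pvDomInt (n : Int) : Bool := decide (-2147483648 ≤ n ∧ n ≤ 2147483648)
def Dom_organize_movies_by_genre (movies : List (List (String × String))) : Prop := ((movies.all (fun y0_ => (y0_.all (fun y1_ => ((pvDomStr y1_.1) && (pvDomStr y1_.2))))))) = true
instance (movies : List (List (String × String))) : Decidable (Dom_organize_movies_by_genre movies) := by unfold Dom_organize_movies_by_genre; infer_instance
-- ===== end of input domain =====

-- B replaces A's interleaved create/dedupe/cap insert loop by a full grouping pass followed by a
-- per-genre dedupe-then-truncate pass (objective: alternative decomposition, same cost; return value only, no observable mutation).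

-- ===== PORT A =====
def organize_movies_by_genre (movies : List (List (String × String))) : List (String × List (List (String × String))) :=
  (movies.foldl (fun gm movie =>
    -- genres = movie.get('Genre', '').split(', ')   (', ' ≠ '', so split? is always some)
    (((PySem.Str.split? ((PySem.Dict.mk movie).getD "Genre" "") ", ").getD []).foldl (fun gm genre =>
      if genre ≠ "" ∧ genre ≠ "N/A" then
        let gm := if gm.contains genre then gm else gm.insert genre ([] : List (List (String × String)))
        let cur := gm.getD genre []
        if movie ∉ cur ∧ cur.length < 10 then gm.insert genre (cur ++ [movie]) else gm
      else gm) gm)) PySem.Dict.empty).items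

-- ===== PORT B =====
-- helper _first_distinct of Source B
def pvFirstDistinct (occ : List (List (String × String))) : List (List (String × String)) :=
  occ.foldl (fun seen m => if m ∉ seen then seen ++ [m] else seen) []

def organize_movies_by_genre_alt (movies : List (List (String × String))) : List (String × List (List (String × String))) :=
  let grouped := movies.foldl (fun gm movie =>
    (((PySem.Str.split? ((PySem.Dict.mk movie).getD "Genre" "") ", ").getD []).foldl (fun gm genre =>
      if genre ≠ "" ∧ genre ≠ "N/A" then
        -- grouped.setdefault(genre, []).append(movie): d[genre] = d.get(genre, []) + [movie]
        gm.modify genre [] (· ++ [movie])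
      else gm) gm)) PySem.Dict.empty
  grouped.items.map (fun kv => (kv.1, PySem.List.slice (pvFirstDistinct kv.2) none (some 10)))

-- ===== PRECONDITION & SPEC =====
def Spec_organize_movies_by_genre (movies : List (List (String × String))) (out : List (String × List (List (String × String)))) : Prop := out = organize_movies_by_genre_alt movies
instance (movies : List (List (String × String))) (out : List (String × List (List (String × String)))) : Decidable (Spec_organize_movies_by_genre movies out) := by unfold Spec_organize_movies_by_genre; infer_instance

-- ===== CLAIM (what is proved, stated in full; the proofs are below) =====
def Claim_equal_organize_movies_by_genre : Prop := ∀ (movies : List (List (String × String))), Dom_organize_movies_by_genre movies → Spec_organize_movies_by_genre movies (organize_movies_by_genre movies)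

-- ===== LEMMAS AND PROOFS =====

-- the value B's second pass produces for an occurrence list
def pvDD (F : List (List (String × String))) : List (List (String × String)) :=
  (pvFirstDistinct F).take 10

-- invariant between A's dict state and B's first-pass dict state
def pvInv (a b : PySem.Dict String (List (List (String × String)))) : Prop :=
  b.keys.Nodup ∧ a.items = b.items.map (fun kv => (kv.1, pvDD kv.2))

lemma pvFirstDistinct_snoc (F : List (List (String × String))) (m : List (String × String)) :
    pvFirstDistinct (F ++ [m]) =
      if m ∉ pvFirstDistinct F then pvFirstDistinct F ++ [m] else pvFirstDistinct F := by
  simp [pvFirstDistinct, List.foldl_append]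

lemma pvDD_len (F : List (List (String × String))) :
    (pvDD F).length = min 10 (pvFirstDistinct F).length := by
  simp [pvDD]

-- B's dedupe-then-truncate absorbs one more occurrence exactly the way A's capped insert does
lemma pvDD_snoc (F : List (List (String × String))) (m : List (String × String)) :
    pvDD (F ++ [m]) =
      if m ∉ pvDD F ∧ (pvDD F).length < 10 then pvDD F ++ [m] else pvDD F := by
  set o := pvFirstDistinct F with ho
  rw [pvDD, pvFirstDistinct_snoc, ← ho]
  by_cases hm : m ∈ o
  · have hc : ¬ (m ∉ pvDD F ∧ (pvDD F).length < 10) := by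
      rintro ⟨hnot, hlen⟩
      rw [pvDD_len, ← ho] at hlen
      exact hnot (by rw [pvDD, ← ho, List.take_of_length_le (by omega)]; exact hm)
    rw [if_neg (by simp [hm]), if_neg hc, pvDD, ← ho]
  · have hmt : m ∉ pvDD F := fun h => hm (List.mem_of_mem_take h)
    rw [if_pos hm]
    by_cases h10 : o.length < 10
    · rw [List.take_of_length_le (by simp; omega),
        if_pos ⟨hmt, by rw [pvDD_len, ← ho]; omega⟩, pvDD, ← ho,
        List.take_of_length_le (by omega)]
    · rw [List.take_append_of_le_length (by omega),
        if_neg (by rintro ⟨-, hlen⟩; rw [pvDD_len, ← ho] at hlen; omega), pvDD, ← ho]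

lemma pvDD_single (m : List (String × String)) : pvDD [m] = [m] := by
  simp [pvDD, pvFirstDistinct]

-- one genre occurrence of one movie preserves the invariant
lemma pvInv_step (a b : PySem.Dict String (List (List (String × String))))
    (m : List (String × String)) (g : String) (h : pvInv a b) :
    pvInv
      (if g ≠ "" ∧ g ≠ "N/A" then
        let a' := if a.contains g then a else a.insert g []
        let cur := a'.getD g []
        if m ∉ cur ∧ cur.length < 10 then a'.insert g (cur ++ [m]) else a'
      else a)
      (if g ≠ "" ∧ g ≠ "N/A" then b.modify g [] (· ++ [m]) else b) := by
  by_cases hg : g ≠ "" ∧ g ≠ "N/A"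
  · rw [if_pos hg, if_pos hg]
    obtain ⟨hnd, hitems⟩ := h
    have hkeys : a.keys = b.keys := by
      simp only [PySem.Dict.keys, hitems, List.map_map]; rfl
    have hcon : a.contains g = b.contains g := by
      rw [PySem.Dict.contains_eq_decide_mem_keys, PySem.Dict.contains_eq_decide_mem_keys, hkeys]
    have hmod : b.modify g [] (· ++ [m]) = b.insert g (b.getD g [] ++ [m]) := rfl
    by_cases hcb : b.contains g = true
    · -- existing key
      have hca : a.contains g = true := by rw [hcon]; exact hcb
      obtain ⟨F, hF⟩ : ∃ F, b.get? g = some F := by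
        have := PySem.Dict.contains_eq_isSome_get? b g
        rw [hcb] at this
        exact Option.isSome_iff_exists.mp this.symm
      have hFD : b.getD g [] = F := PySem.Dict.getD_of_get?_eq_some b [] hF
      have hFmem : (g, F) ∈ b.items := PySem.Dict.mem_items_of_get?_eq_some b hF
      have hamem : (g, pvDD F) ∈ a.items := by
        rw [hitems]; exact List.mem_map.mpr ⟨(g, F), hFmem, rfl⟩
      have hnda : a.keys.Nodup := by rw [hkeys]; exact hnd
      have hcur : a.getD g [] = pvDD F := PySem.Dict.getD_of_mem_items a hamem hnda []
      rw [hmod, hFD]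
      simp only [hca, if_true]
      rw [hcur]
      constructor
      · exact PySem.Dict.nodup_keys_insert b g (F ++ [m]) hnd
      · rw [PySem.Dict.items_insert_of_contains b (F ++ [m]) hcb, List.map_map]
        have hbmap : List.map
            ((fun kv => (kv.1, pvDD kv.2)) ∘ (fun p => if (p.1 == g) = true then (g, F ++ [m]) else p)) b.items
            = List.map (fun q => if (q.1 == g) = true then (g, pvDD (F ++ [m])) else q) a.items := by
          rw [hitems, List.map_map]
          apply List.map_congr_left
          intro p hp
          by_cases hpg : p.1 = g <;> simp [hpg]
        rw [hbmap]
        by_cases hc : m ∉ pvDD F ∧ (pvDD F).length < 10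
        · rw [if_pos hc, PySem.Dict.items_insert_of_contains a (pvDD F ++ [m]) hca,
            pvDD_snoc, if_pos hc]
        · rw [if_neg hc, pvDD_snoc, if_neg hc]
          symm
          have hid : ∀ q ∈ a.items,
              (fun q => if (q.1 == g) = true then (g, pvDD F) else q) q = id q := by
            intro q hq
            by_cases hqg : q.1 = g
            · have hget : a.get? g = some q.2 := by
                have := PySem.Dict.get?_of_mem_items a (k := q.1) (v := q.2) (by simpa using hq) hnda
                rwa [hqg] at this
              have hq2 : q.2 = pvDD F := by
                have h2 := PySem.Dict.get?_of_mem_items a hamem hnda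
                rw [hget] at h2
                exact Option.some_inj.mp h2
              have hqe : (g, pvDD F) = q := by rw [← hq2, ← hqg]
              simp [hqg, hqe]
            · simp [hqg]
          rw [List.map_congr_left hid, List.map_id]
    · -- new key
      have hcb' : b.contains g = false := by simpa using hcb
      have hca : a.contains g = false := by rw [hcon]; exact hcb'
      have hFD : b.getD g [] = [] := PySem.Dict.getD_of_not_contains b [] hcb'
      rw [hmod, hFD]
      simp only [hca, Bool.false_eq_true, if_false]
      rw [PySem.Dict.getD_insert_self a g [] []]
      simp only [List.not_mem_nil, not_false_iff, List.length_nil, true_and,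
        Nat.zero_lt_succ, if_true, List.nil_append]
      rw [PySem.Dict.insert_insert_self]
      constructor
      · exact PySem.Dict.nodup_keys_insert b g [m] hnd
      · rw [PySem.Dict.items_insert_of_not_contains a [m] hca,
          PySem.Dict.items_insert_of_not_contains b [m] hcb', List.map_append, hitems]
        simp [pvDD_single]
  · rw [if_neg hg, if_neg hg]; exact h

lemma pv_foldl_rel {α β γ : Type} (P : α → β → Prop) (fa : α → γ → α) (fb : β → γ → β)
    (h : ∀ a b x, P a b → P (fa a x) (fb b x)) :
    ∀ (l : List γ) (a : α) (b : β), P a b → P (List.foldl fa a l) (List.foldl fb b l) := by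
  intro l
  induction l with
  | nil => intro a b hab; exact hab
  | cons x xs ih => intro a b hab; exact ih _ _ (h a b x hab)

theorem organize_movies_by_genre_spec_aux (movies : List (List (String × String))) :
    organize_movies_by_genre movies = organize_movies_by_genre_alt movies := by
  unfold organize_movies_by_genre organize_movies_by_genre_alt
  have hinv := pv_foldl_rel pvInv _ _
    (fun a b movie hab =>
      pv_foldl_rel pvInv _ _
        (fun a b g hab => pvInv_step a b movie g hab)
        ((PySem.Str.split? ((PySem.Dict.mk movie).getD "Genre" "") ", ").getD []) a b hab)
    movies PySem.Dict.empty PySem.Dict.empty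
    ⟨PySem.Dict.nodup_keys_empty, by simp [PySem.Dict.empty]⟩
  obtain ⟨-, hitems⟩ := hinv
  dsimp only
  rw [hitems]
  apply List.map_congr_left
  intro kv _
  have : PySem.List.slice (pvFirstDistinct kv.2) none (some 10) = (pvFirstDistinct kv.2).take 10 := by
    rw [PySem.List.slice_to (pvFirstDistinct kv.2) (by norm_num)]
    rfl
  simp [pvDD, this]

-- ===== VERDICT (by name: the statement is the Claim_ definition above) =====
theorem organize_movies_by_genre_spec : Claim_equal_organize_movies_by_genre := by
  intro movies _
  exact organize_movies_by_genre_spec_aux movies
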